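-- pv_equiv track=rewrite | github.com/vicliu624/Explicit-Architecture | explicit_architecture_experiment/data_generation/code_splitters/java_splitter.py | _handle_simple_file
-- ===== SOURCE A (Python) =====
-- from typing import List, Tuple, Optional, Dict, Set, NamedTuple
--
-- def _handle_simple_file(lines: List[str]) -> Optional[Tuple[str, str]]:
--     """处理简单文件（少于10行）"""
--     if len(lines) < 2:
--         return None
--
--     # 对于简单文件，降低要求
--     min_length = 10  # 进一步降低最小长度要求
--
--     # 尝试在类声明后分割
--     for i, line in enumerate(lines):
--         line_stripped = line.strip()
--         if (line_stripped and
--             not line_stripped.startswith(('//', '/*', '*', 'package ', 'import ')) and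
--             ('class ' in line_stripped or 'interface ' in line_stripped or
--              'enum ' in line_stripped or 'record ' in line_stripped)):
--             if i + 1 < len(lines):
--                 prefix = "".join(lines[:i+1])
--                 suffix = "".join(lines[i+1:])
--                 if (len(prefix.strip()) >= min_length and
--                     len(suffix.strip()) >= min_length):
--                     return prefix, suffix
--
--     # 如果类声明分割失败，尝试在方法后分割
--     for i, line in enumerate(lines):
--         line_stripped = line.strip()
--         if (line_stripped and
--             not line_stripped.startswith(('//', '/*', '*', 'package ', 'import ')) and
--             ('(' in line_stripped and ')' in line_stripped and
--              not any(kw in line_stripped for kw in ['class', 'interface', 'enum', 'record']))):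
--             if i + 1 < len(lines):
--                 prefix = "".join(lines[:i+1])
--                 suffix = "".join(lines[i+1:])
--                 if (len(prefix.strip()) >= min_length and
--                     len(suffix.strip()) >= min_length):
--                     return prefix, suffix
--
--     # 最后的备用方案：在中间分割
--     mid_point = len(lines) // 2
--     if mid_point > 0 and mid_point < len(lines):
--         prefix = "".join(lines[:mid_point])
--         suffix = "".join(lines[mid_point:])
--         if (len(prefix.strip()) >= min_length and
--             len(suffix.strip()) >= min_length):
--             return prefix, suffix
--
--     # 如果所有方法都失败，尝试在最后一行前分割
--     if len(lines) >= 3: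
--         prefix = "".join(lines[:-1])
--         suffix = lines[-1]
--         if len(prefix.strip()) >= min_length:
--             return prefix, suffix
--
--     return None
-- ===== SOURCE B (Python) =====
-- from typing import List, Tuple, Optional
--
-- def _handle_simple_file(lines: List[str]) -> Optional[Tuple[str, str]]:
--     n = len(lines)
--     if n < 2:
--         return None
--
--     min_length = 10
--
--     # per-line stats: (length, stripped length, leading-ws count, trailing-ws count)
--     stats = [(len(s), len(s.strip()), len(s) - len(s.lstrip()), len(s) - len(s.rstrip()))
--              for s in lines]
--
--     # pstrip[i] = len("".join(lines[:i+1]).strip()), one pass with a (stripped-len, trailing-ws) state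
--     pstrip = []
--     sl = tw = 0
--     for (L, T, lw, trw) in stats:
--         if T == 0:
--             tw += L
--         elif sl == 0:
--             sl, tw = T, trw
--         else:
--             sl, tw = sl + tw + lw + T, trw
--         pstrip.append(sl)
--
--     # sstrip[i] = len("".join(lines[i:]).strip()), one backward pass with a (stripped-len, leading-ws) state
--     sstrip = [0] * (n + 1)
--     sl = lwa = 0
--     for i in range(n - 1, -1, -1):
--         L, T, lw, trw = stats[i]
--         if T == 0:
--             lwa += L
--         elif sl == 0:
--             sl, lwa = T, lw
--         else:
--             sl, lwa = T + trw + lwa + sl, lw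
--         sstrip[i] = sl
--
--     def find(cond):
--         for i in range(n):
--             t = lines[i].strip()
--             if (t and
--                     not t.startswith(('//', '/*', '*', 'package ', 'import ')) and
--                     cond(t) and i + 1 < n and
--                     pstrip[i] >= min_length and sstrip[i + 1] >= min_length):
--                 return i
--         return None
--
--     def cond1(t):
--         return ('class ' in t or 'interface ' in t or
--                 'enum ' in t or 'record ' in t)
--
--     def cond2(t):
--         return ('(' in t and ')' in t and
--                 not any(kw in t for kw in ['class', 'interface', 'enum', 'record']))
--
--     def split_at(k):
--         return "".join(lines[:k]), "".join(lines[k:])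
--
--     for cond in (cond1, cond2):
--         i = find(cond)
--         if i is not None:
--             return split_at(i + 1)
--
--     mid = n // 2
--     if pstrip[mid - 1] >= min_length and sstrip[mid] >= min_length:
--         return split_at(mid)
--
--     if n >= 3 and pstrip[n - 2] >= min_length:
--         return "".join(lines[:-1]), lines[-1]
--
--     return None
-- ===== Notes on version B (the rewrite author's own statement) =====
-- stated objective: alternative
-- what changed: Instead of joining and stripping the two halves at every candidate line, B precomputes per-line (length, stripped length, leading/trailing whitespace) stats and folds them into prefix- and suffix-stripped-length tables in two linear passes, then searches for the first acceptable split index and joins the strings exactly once.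
import Mathlib
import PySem

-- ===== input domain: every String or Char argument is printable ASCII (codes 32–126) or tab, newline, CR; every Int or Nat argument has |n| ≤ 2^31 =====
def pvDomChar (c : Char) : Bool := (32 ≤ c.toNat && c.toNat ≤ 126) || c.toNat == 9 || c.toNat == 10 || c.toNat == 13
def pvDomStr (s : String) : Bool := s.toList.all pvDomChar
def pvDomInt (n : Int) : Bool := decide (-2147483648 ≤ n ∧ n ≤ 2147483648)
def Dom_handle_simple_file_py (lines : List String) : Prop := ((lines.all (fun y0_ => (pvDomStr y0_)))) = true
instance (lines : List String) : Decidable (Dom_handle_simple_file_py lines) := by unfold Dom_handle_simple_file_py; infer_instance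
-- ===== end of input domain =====

-- B replaces A's per-candidate join+strip length checks by two O(n) passes that track the
-- stripped length of every prefix/suffix concatenation, joining strings only once at the end
-- (objective: alternative; same results on all inputs).

-- ===== PORT A =====
-- helpers shared with port B: the line-classification tests both Pythons spell out identically
def pvStarts (t : String) : Bool :=
  PySem.Str.startswith t "//" || PySem.Str.startswith t "/*" || PySem.Str.startswith t "*" ||
  PySem.Str.startswith t "package " || PySem.Str.startswith t "import "

def pvCond1 (t : String) : Bool :=
  (PySem.Str.len t != 0) && !pvStarts t &&
  (PySem.Str.isIn "class " t || PySem.Str.isIn "interface " t ||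
   PySem.Str.isIn "enum " t || PySem.Str.isIn "record " t)

def pvCond2 (t : String) : Bool :=
  (PySem.Str.len t != 0) && !pvStarts t &&
  (PySem.Str.isIn "(" t && PySem.Str.isIn ")" t &&
   !(["class", "interface", "enum", "record"].any (fun kw => PySem.Str.isIn kw t)))

-- A's 'for i, line in enumerate(lines)' loops: join the two halves at each candidate line
def pvLoopA (lines : List String) (cond : String → Bool) : List String → Nat → Option (String × String)
  | [], _ => none
  | l :: rs, i =>
    if cond (PySem.Str.strip l) && decide (i + 1 < lines.length) then
      let pre := PySem.Str.join "" (lines.take (i + 1))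
      let suf := PySem.Str.join "" (lines.drop (i + 1))
      if 10 ≤ PySem.Str.len (PySem.Str.strip pre) ∧ 10 ≤ PySem.Str.len (PySem.Str.strip suf)
      then some (pre, suf)
      else pvLoopA lines cond rs (i + 1)
    else pvLoopA lines cond rs (i + 1)

def handle_simple_file_py (lines : List String) : Option (String × String) :=
  if lines.length < 2 then none else
  match pvLoopA lines pvCond1 lines 0 with
  | some r => some r
  | none =>
    match pvLoopA lines pvCond2 lines 0 with
    | some r => some r
    | none =>
      let mid := lines.length / 2
      let midRes : Option (String × String) :=
        if 0 < mid ∧ mid < lines.length then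
          let pre := PySem.Str.join "" (lines.take mid)
          let suf := PySem.Str.join "" (lines.drop mid)
          if 10 ≤ PySem.Str.len (PySem.Str.strip pre) ∧ 10 ≤ PySem.Str.len (PySem.Str.strip suf)
          then some (pre, suf) else none
        else none
      match midRes with
      | some r => some r
      | none =>
        if 3 ≤ lines.length then
          let pre := PySem.Str.join "" (lines.take (lines.length - 1))
          let suf := lines.getLastD ""   -- lines[-1]; exact: lines.length ≥ 3 in this branch
          if 10 ≤ PySem.Str.len (PySem.Str.strip pre) then some (pre, suf) else none
        else none

-- ===== PORT B =====
-- per-line stats: (length, stripped length, leading-whitespace count, trailing-whitespace count)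
def pvStat (s : String) : Nat × Nat × Nat × Nat :=
  (s.toList.length, (PySem.Str.strip s).toList.length,
   s.toList.length - (PySem.Str.lstrip s).toList.length,
   s.toList.length - (PySem.Str.rstrip s).toList.length)

-- forward pass: element i = len("".join(lines[:i+1]).strip()); state (stripped len, trailing ws)
def pvPstripList : (Nat × Nat) → List (Nat × Nat × Nat × Nat) → List Nat
  | _, [] => []
  | st, (L, T, lw, trw) :: rest =>
    let st' : Nat × Nat :=
      if T = 0 then (st.1, st.2 + L)
      else if st.1 = 0 then (T, trw)
      else (st.1 + st.2 + lw + T, trw)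
    st'.1 :: pvPstripList st' rest

-- backward pass: element i = state for "".join(lines[i:]): (stripped len, leading ws)
def pvSstripList : List (Nat × Nat × Nat × Nat) → List (Nat × Nat)
  | [] => [(0, 0)]
  | (L, T, lw, trw) :: rest =>
    let r := pvSstripList rest
    let st := r.headI
    (if T = 0 then (st.1, st.2 + L)
     else if st.1 = 0 then (T, lw)
     else (T + trw + st.2 + st.1, lw)) :: r

-- B's search loop: find the first splittable line using the precomputed tables only
def pvSearch (cond : String → Bool) (n : Nat) (ps ss : List Nat) : List String → Nat → Option Nat
  | [], _ => none
  | l :: rs, i =>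
    if cond (PySem.Str.strip l) && decide (i + 1 < n) &&
       decide (10 ≤ ps.getD i 0) && decide (10 ≤ ss.getD (i + 1) 0)
    then some i
    else pvSearch cond n ps ss rs (i + 1)

def handle_simple_file_py_alt (lines : List String) : Option (String × String) :=
  if lines.length < 2 then none else
  let n := lines.length
  let stats := lines.map pvStat
  let ps := pvPstripList (0, 0) stats
  let ss := (pvSstripList stats).map Prod.fst
  let split : Nat → Option (String × String) := fun k =>
    some (PySem.Str.join "" (lines.take k), PySem.Str.join "" (lines.drop k))
  match pvSearch pvCond1 n ps ss lines 0 with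
  | some i => split (i + 1)
  | none =>
    match pvSearch pvCond2 n ps ss lines 0 with
    | some i => split (i + 1)
    | none =>
      let mid := n / 2
      if 10 ≤ ps.getD (mid - 1) 0 ∧ 10 ≤ ss.getD mid 0 then split mid
      else if 3 ≤ n ∧ 10 ≤ ps.getD (n - 2) 0 then
        some (PySem.Str.join "" (lines.take (n - 1)), lines.getLastD "")   -- lines[-1]; n ≥ 3 here
      else none

-- ===== PRECONDITION & SPEC =====
def Spec_handle_simple_file_py (lines : List String) (out : Option (String × String)) : Prop := out = handle_simple_file_py_alt lines
instance (lines : List String) (out : Option (String × String)) : Decidable (Spec_handle_simple_file_py lines out) := by unfold Spec_handle_simple_file_py; infer_instance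

-- ===== CLAIM (what is proved, stated in full; the proofs are below) =====
def Claim_equal_handle_simple_file_py : Prop := ∀ (lines : List String), Dom_handle_simple_file_py lines → Spec_handle_simple_file_py lines (handle_simple_file_py lines)

-- ===== LEMMAS AND PROOFS =====
-- spec-side measures on character lists
def pvSL (cs : List Char) : Nat := (PySem.Chars.strip cs).length
def pvLW (cs : List Char) : Nat := cs.length - (PySem.Chars.lstrip cs).length
def pvTW (cs : List Char) : Nat := cs.length - (PySem.Chars.rstrip cs).length
def pvCat (ls : List String) : List Char := (ls.map String.toList).flatten

lemma pv_join_toList (ls : List String) : (PySem.Str.join "" ls).toList = pvCat ls := by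
  rw [PySem.Str.toList_join]
  show PySem.Chars.join ([] : List Char) _ = _
  unfold pvCat PySem.Chars.join List.intercalate
  induction ls.map String.toList with
  | nil => rfl
  | cons a l ih => cases l <;> simp_all [List.intersperse]

lemma pv_lstrip_nil_iff (c : List Char) :
    PySem.Chars.lstrip c = [] ↔ ∀ x ∈ c, PySem.Chars.isspace x := by
  simp [PySem.Chars.lstrip, List.dropWhile_eq_nil_iff]

lemma pv_rstrip_nil_iff (c : List Char) :
    PySem.Chars.rstrip c = [] ↔ ∀ x ∈ c, PySem.Chars.isspace x := by
  simp [PySem.Chars.rstrip, List.dropWhile_eq_nil_iff]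

lemma pv_strip_nil_iff (c : List Char) :
    PySem.Chars.strip c = [] ↔ ∀ x ∈ c, PySem.Chars.isspace x := by
  unfold PySem.Chars.strip
  rw [pv_rstrip_nil_iff]
  constructor
  · intro h x hx
    by_cases hall : ∀ x ∈ c, PySem.Chars.isspace x
    · exact hall x hx
    · exfalso
      have hne : PySem.Chars.lstrip c ≠ [] := by
        rw [Ne, pv_lstrip_nil_iff]; exact hall
      have hhead := List.head_dropWhile_not (p := PySem.Chars.isspace) (l := c) hne
      have hmem : (PySem.Chars.lstrip c).head hne ∈ PySem.Chars.lstrip c := List.head_mem hne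
      have := h _ hmem
      exact absurd ((this).symm.trans hhead) (by decide)
  · intro h x hx
    exact h x (List.Sublist.mem hx (List.dropWhile_sublist _))

lemma pv_SL_zero_iff (c : List Char) : pvSL c = 0 ↔ ∀ x ∈ c, PySem.Chars.isspace x := by
  simp [pvSL, List.length_eq_zero_iff, pv_strip_nil_iff]

lemma pv_lstrip_append (a b : List Char) :
    PySem.Chars.lstrip (a ++ b) =
      if PySem.Chars.lstrip a = [] then PySem.Chars.lstrip b else PySem.Chars.lstrip a ++ b := by
  simp only [PySem.Chars.lstrip, List.dropWhile_append, List.isEmpty_iff]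

lemma pv_rstrip_append (a b : List Char) :
    PySem.Chars.rstrip (a ++ b) =
      if PySem.Chars.rstrip b = [] then PySem.Chars.rstrip a else a ++ PySem.Chars.rstrip b := by
  simp only [PySem.Chars.rstrip, List.reverse_append, List.dropWhile_append, List.isEmpty_iff,
    List.reverse_eq_nil_iff]
  split_ifs with h1 <;> simp_all

lemma pv_len_lstrip_le (c : List Char) : (PySem.Chars.lstrip c).length ≤ c.length :=
  List.length_dropWhile_le _ _

lemma pv_len_rstrip_le (c : List Char) : (PySem.Chars.rstrip c).length ≤ c.length := by
  simpa [PySem.Chars.rstrip] using List.length_dropWhile_le PySem.Chars.isspace c.reverse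

lemma pv_len_strip_le_lstrip (c : List Char) :
    (PySem.Chars.strip c).length ≤ (PySem.Chars.lstrip c).length :=
  pv_len_rstrip_le _

-- for a string with a non-whitespace char: length = leading ws + stripped + trailing ws
lemma pv_len_decomp (c : List Char) (h : pvSL c ≠ 0) :
    c.length = pvLW c + pvSL c + pvTW c := by
  have hlsne : PySem.Chars.lstrip c ≠ [] := by
    rw [Ne, pv_lstrip_nil_iff]
    intro hall
    exact h ((pv_SL_zero_iff c).mpr hall)
  -- strip c = rstrip (lstrip c); show its dropped-tail count equals pvTW c
  have hkey : (PySem.Chars.lstrip c).length - (PySem.Chars.strip c).length = pvTW c := by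
    unfold PySem.Chars.strip
    -- c = takeWhile ws c ++ lstrip c; rstrip drops the same trailing run from both
    have hsplit : c = c.takeWhile PySem.Chars.isspace ++ PySem.Chars.lstrip c := by
      simp [PySem.Chars.lstrip]
    have htw : PySem.Chars.rstrip c =
        c.takeWhile PySem.Chars.isspace ++ PySem.Chars.rstrip (PySem.Chars.lstrip c) := by
      conv_lhs => rw [hsplit]
      rw [pv_rstrip_append]
      have : PySem.Chars.rstrip (PySem.Chars.lstrip c) ≠ [] := by
        rw [Ne, pv_rstrip_nil_iff]
        intro hall
        apply h
        rw [pv_SL_zero_iff]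
        intro x hx
        have hx2 : x ∈ c.takeWhile PySem.Chars.isspace ++ PySem.Chars.lstrip c := by
          rw [← hsplit]; exact hx
        rcases List.mem_append.mp hx2 with hx' | hx'
        · exact List.mem_takeWhile_imp hx'
        · exact hall x hx'
      simp [this]
    have h1 : c.length = (c.takeWhile PySem.Chars.isspace).length + (PySem.Chars.lstrip c).length := by
      conv_lhs => rw [hsplit]
      simp
    have h2 : (PySem.Chars.rstrip c).length =
        (c.takeWhile PySem.Chars.isspace).length + (PySem.Chars.rstrip (PySem.Chars.lstrip c)).length := by
      rw [htw]; simp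
    have h3 := pv_len_rstrip_le (PySem.Chars.lstrip c)
    unfold pvTW
    omega
  have h4 := pv_len_strip_le_lstrip c
  have h5 := pv_len_lstrip_le c
  unfold pvLW pvSL at *
  unfold PySem.Chars.strip at *
  omega

lemma pv_SL_zero_iff_lstrip (c : List Char) : pvSL c = 0 ↔ PySem.Chars.lstrip c = [] := by
  rw [pv_SL_zero_iff, pv_lstrip_nil_iff]

lemma pv_SL_zero_iff_rstrip (c : List Char) : pvSL c = 0 ↔ PySem.Chars.rstrip c = [] := by
  rw [pv_SL_zero_iff, pv_rstrip_nil_iff]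

lemma pv_TW_append (a b : List Char) :
    pvTW (a ++ b) = if pvSL b = 0 then pvTW a + b.length else pvTW b := by
  have ha := pv_len_rstrip_le a
  have hb := pv_len_rstrip_le b
  unfold pvTW
  rw [pv_rstrip_append]
  split_ifs with h h' h'
  · simp only [List.length_append]
    omega
  · exact absurd ((pv_SL_zero_iff_rstrip b).mpr h) h'
  · exact absurd ((pv_SL_zero_iff_rstrip b).mp h') h
  · simp only [List.length_append]
    omega

lemma pv_LW_append (a b : List Char) :
    pvLW (a ++ b) = if pvSL a = 0 then a.length + pvLW b else pvLW a := by
  have ha := pv_len_lstrip_le a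
  have hb := pv_len_lstrip_le b
  unfold pvLW
  rw [pv_lstrip_append]
  split_ifs with h h' h'
  · simp only [List.length_append]
    omega
  · exact absurd ((pv_SL_zero_iff_lstrip a).mpr h) h'
  · exact absurd ((pv_SL_zero_iff_lstrip a).mp h') h
  · simp only [List.length_append]
    omega

lemma pv_SL_append (a b : List Char) :
    pvSL (a ++ b) = if pvSL b = 0 then pvSL a
      else if pvSL a = 0 then pvSL b
      else pvSL a + pvTW a + pvLW b + pvSL b := by
  by_cases hb : pvSL b = 0 <;> by_cases ha : pvSL a = 0
  · -- both all-whitespace pieces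
    simp only [hb, ha, if_pos]
    have : ∀ x ∈ a ++ b, PySem.Chars.isspace x := by
      intro x hx
      rcases List.mem_append.mp hx with h | h
      · exact (pv_SL_zero_iff a).mp ha x h
      · exact (pv_SL_zero_iff b).mp hb x h
    rw [(pv_SL_zero_iff _).mpr this]
  · -- b all whitespace: strip (a++b) = strip a
    rw [if_pos hb]
    unfold pvSL PySem.Chars.strip
    rw [pv_lstrip_append, if_neg ((not_iff_not.mpr (pv_SL_zero_iff_lstrip a)).mp ha),
      pv_rstrip_append, if_pos ((pv_SL_zero_iff_rstrip b).mp hb)]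
  · -- a all whitespace: strip (a++b) = strip b
    rw [if_neg hb, if_pos ha]
    unfold pvSL PySem.Chars.strip
    rw [pv_lstrip_append, if_pos ((pv_SL_zero_iff_lstrip a).mp ha)]
  · -- both carry content
    rw [if_neg hb, if_neg ha]
    have hda := pv_len_decomp a ha
    have hdb := pv_len_decomp b hb
    have h1 : pvSL (a ++ b) =
        (PySem.Chars.lstrip a).length + (PySem.Chars.rstrip b).length := by
      unfold pvSL PySem.Chars.strip
      rw [pv_lstrip_append, if_neg ((not_iff_not.mpr (pv_SL_zero_iff_lstrip a)).mp ha),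
        pv_rstrip_append, if_neg ((not_iff_not.mpr (pv_SL_zero_iff_rstrip b)).mp hb)]
      simp
    have h2 := pv_len_lstrip_le a
    have h3 := pv_len_rstrip_le b
    unfold pvLW pvTW at *
    omega

lemma pv_stat_eq (s : String) :
    pvStat s = (s.toList.length, pvSL s.toList, pvLW s.toList, pvTW s.toList) := by
  simp [pvStat, pvSL, pvLW, pvTW, PySem.Str.toList_strip, PySem.Str.toList_lstrip,
    PySem.Str.toList_rstrip]

-- one forward step is exact
lemma pv_pstep (cs ds : List Char) :
    (if pvSL ds = 0 then (pvSL cs, pvTW cs + ds.length)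
     else if pvSL cs = 0 then (pvSL ds, pvTW ds)
     else (pvSL cs + pvTW cs + pvLW ds + pvSL ds, pvTW ds)) =
    (pvSL (cs ++ ds), pvTW (cs ++ ds)) := by
  rw [pv_SL_append, pv_TW_append]
  split_ifs <;> rfl

-- one backward step is exact
lemma pv_sstep (a ds : List Char) :
    (if pvSL a = 0 then (pvSL ds, pvLW ds + a.length)
     else if pvSL ds = 0 then (pvSL a, pvLW a)
     else (pvSL a + pvTW a + pvLW ds + pvSL ds, pvLW a)) =
    (pvSL (a ++ ds), pvLW (a ++ ds)) := by
  rw [pv_SL_append, pv_LW_append]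
  split_ifs <;> simp_all [Nat.add_comm]

lemma pv_pstrip_spec (ls : List String) (cs : List Char) (k : Nat) (hk : k < ls.length) :
    (pvPstripList (pvSL cs, pvTW cs) (ls.map pvStat)).getD k 0 =
      pvSL (cs ++ pvCat (ls.take (k + 1))) := by
  induction ls generalizing cs k with
  | nil => simp at hk
  | cons a ls ih =>
    rw [List.map_cons, pv_stat_eq]
    show (let st' : Nat × Nat :=
        if pvSL a.toList = 0 then (pvSL cs, pvTW cs + a.toList.length)
        else if pvSL cs = 0 then (pvSL a.toList, pvTW a.toList)
        else (pvSL cs + pvTW cs + pvLW a.toList + pvSL a.toList, pvTW a.toList);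
      (st'.1 :: pvPstripList st' (ls.map pvStat)).getD k 0) = _
    rw [show (if pvSL a.toList = 0 then (pvSL cs, pvTW cs + a.toList.length)
        else if pvSL cs = 0 then (pvSL a.toList, pvTW a.toList)
        else (pvSL cs + pvTW cs + pvLW a.toList + pvSL a.toList, pvTW a.toList))
      = (pvSL (cs ++ a.toList), pvTW (cs ++ a.toList)) from pv_pstep cs a.toList]
    match k with
    | 0 => simp [pvCat]
    | k + 1 =>
      have hk' : k < ls.length := by simpa using hk
      have := ih (cs ++ a.toList) k hk'
      simpa [pvCat, List.flatten] using this

lemma pvSstripList_ne_nil (l : List (Nat × Nat × Nat × Nat)) : pvSstripList l ≠ [] := by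
  match l with
  | [] => simp [pvSstripList]
  | x :: r =>
    show _ :: _ ≠ []
    simp

lemma pv_sstrip_spec (ls : List String) (k : Nat) (hk : k ≤ ls.length) :
    (pvSstripList (ls.map pvStat)).getD k (0, 0) =
      (pvSL (pvCat (ls.drop k)), pvLW (pvCat (ls.drop k))) := by
  induction ls generalizing k with
  | nil =>
    have : k = 0 := Nat.le_zero.mp hk
    subst this
    rfl
  | cons a ls ih =>
    rw [List.map_cons, pv_stat_eq]
    show ((if pvSL a.toList = 0
        then ((pvSstripList (ls.map pvStat)).headI.1,
              (pvSstripList (ls.map pvStat)).headI.2 + a.toList.length)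
        else if (pvSstripList (ls.map pvStat)).headI.1 = 0 then (pvSL a.toList, pvLW a.toList)
        else (pvSL a.toList + pvTW a.toList + (pvSstripList (ls.map pvStat)).headI.2 +
              (pvSstripList (ls.map pvStat)).headI.1, pvLW a.toList))
      :: pvSstripList (ls.map pvStat)).getD k (0, 0) = _
    have hhead : (pvSstripList (ls.map pvStat)).headI =
        (pvSL (pvCat ls), pvLW (pvCat ls)) := by
      have h0 := ih 0 (Nat.zero_le _)
      cases hr : pvSstripList (ls.map pvStat) with
      | nil => exact absurd hr (pvSstripList_ne_nil _)
      | cons x r => rw [hr] at h0; simpa using h0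
    rw [hhead]
    match k with
    | 0 =>
      have := pv_sstep a.toList (pvCat ls)
      simp only [List.getD_cons_zero, List.drop_zero]
      rw [show pvCat (a :: ls) = a.toList ++ pvCat ls by simp [pvCat]]
      rw [← this]
    | k + 1 =>
      have hk' : k ≤ ls.length := by simpa using hk
      simpa using ih k hk'

lemma pv_loop_eq (lines : List String) (cond : String → Bool) (ps ss : List Nat)
    (hps : ∀ k, k < lines.length → ps.getD k 0 = pvSL (pvCat (lines.take (k + 1))))
    (hss : ∀ k, k ≤ lines.length → ss.getD k 0 = pvSL (pvCat (lines.drop k))) :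
    ∀ (rest : List String) (i : Nat), rest = lines.drop i →
      pvLoopA lines cond rest i =
        (pvSearch cond lines.length ps ss rest i).map
          (fun k => (PySem.Str.join "" (lines.take (k + 1)), PySem.Str.join "" (lines.drop (k + 1)))) := by
  intro rest
  induction rest with
  | nil => intro i _; rfl
  | cons l rs ih =>
    intro i hr
    have hrs : rs = lines.drop (i + 1) := by
      rw [← List.tail_drop, ← hr]
      rfl
    simp only [pvLoopA, pvSearch]
    cases hc : (cond (PySem.Str.strip l) && decide (i + 1 < lines.length)) with
    | false =>
      simp only [Bool.false_and, Bool.false_eq_true, if_false]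
      exact ih (i + 1) hrs
    | true =>
      have hlt1 : i + 1 < lines.length := by
        have := hc
        simp only [Bool.and_eq_true, decide_eq_true_eq] at this
        exact this.2
      have hpre : PySem.Str.len (PySem.Str.strip (PySem.Str.join "" (lines.take (i + 1)))) =
          (ps.getD i 0 : Int) := by
        rw [hps i (by omega), PySem.Str.len_eq, PySem.Str.toList_strip, pv_join_toList]
        rfl
      have hsuf : PySem.Str.len (PySem.Str.strip (PySem.Str.join "" (lines.drop (i + 1)))) =
          (ss.getD (i + 1) 0 : Int) := by
        rw [hss (i + 1) (by omega), PySem.Str.len_eq, PySem.Str.toList_strip, pv_join_toList]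
        rfl
      by_cases hP : 10 ≤ PySem.Str.len (PySem.Str.strip (PySem.Str.join "" (lines.take (i + 1)))) ∧
          10 ≤ PySem.Str.len (PySem.Str.strip (PySem.Str.join "" (lines.drop (i + 1))))
      · have hd1 : 10 ≤ ps.getD i 0 := by
          have := hP.1; rw [hpre] at this; exact_mod_cast this
        have hd2 : 10 ≤ ss.getD (i + 1) 0 := by
          have := hP.2; rw [hsuf] at this; exact_mod_cast this
        simp only [hd1, hd2, decide_true, Bool.and_true, if_pos hP]
        rfl
      · have hnd : ¬(10 ≤ ps.getD i 0 ∧ 10 ≤ ss.getD (i + 1) 0) := by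
          intro ⟨h1, h2⟩
          exact hP ⟨by rw [hpre]; exact_mod_cast h1, by rw [hsuf]; exact_mod_cast h2⟩
        have hBfalse : (cond (PySem.Str.strip l) && decide (i + 1 < lines.length) &&
            decide (10 ≤ ps.getD i 0) && decide (10 ≤ ss.getD (i + 1) 0)) = false := by
          rw [hc]
          by_cases h1 : 10 ≤ ps.getD i 0
          · by_cases h2 : 10 ≤ ss.getD (i + 1) 0
            · exact absurd ⟨h1, h2⟩ hnd
            · simp only [Bool.true_and, decide_eq_false h2, Bool.and_false]
          · simp only [Bool.true_and, decide_eq_false h1, Bool.false_and]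
        simp only [hc, Bool.true_and, if_pos trivial] at *
        rw [if_neg hP, hBfalse]
        simp only [Bool.false_eq_true, if_false]
        exact ih (i + 1) hrs

lemma pv_getD_map_fst (r : List (Nat × Nat)) (k : Nat) (hk : k < r.length) :
    (r.map Prod.fst).getD k 0 = (r.getD k (0, 0)).1 := by
  rw [List.getD_eq_getElem _ _ (by simpa using hk), List.getD_eq_getElem _ _ hk]
  simp

lemma pvSstripList_length (l : List (Nat × Nat × Nat × Nat)) :
    (pvSstripList l).length = l.length + 1 := by
  induction l with
  | nil => rfl
  | cons x r ih =>
    obtain ⟨L, T, lw, trw⟩ := x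
    show (_ :: pvSstripList _).length = _
    simp [ih]

theorem pv_main (lines : List String) :
    handle_simple_file_py lines = handle_simple_file_py_alt lines := by
  unfold handle_simple_file_py handle_simple_file_py_alt
  by_cases h2 : lines.length < 2
  · simp [h2]
  rw [if_neg h2, if_neg h2]
  dsimp only []
  have hps : ∀ k, k < lines.length →
      (pvPstripList (0, 0) (lines.map pvStat)).getD k 0 = pvSL (pvCat (lines.take (k + 1))) := by
    intro k hk
    have := pv_pstrip_spec lines [] k hk
    simpa using this
  have hss : ∀ k, k ≤ lines.length →
      ((pvSstripList (lines.map pvStat)).map Prod.fst).getD k 0 = pvSL (pvCat (lines.drop k)) := by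
    intro k hk
    rw [pv_getD_map_fst _ _ (by rw [pvSstripList_length]; simpa using Nat.lt_succ_of_le hk)]
    rw [pv_sstrip_spec lines k hk]
  rw [pv_loop_eq lines pvCond1 _ _ hps hss lines 0 (by simp)]
  cases pvSearch pvCond1 lines.length (pvPstripList (0, 0) (lines.map pvStat))
      ((pvSstripList (lines.map pvStat)).map Prod.fst) lines 0 with
  | some i => rfl
  | none =>
    simp only [Option.map_none]
    rw [pv_loop_eq lines pvCond2 _ _ hps hss lines 0 (by simp)]
    cases pvSearch pvCond2 lines.length (pvPstripList (0, 0) (lines.map pvStat))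
        ((pvSstripList (lines.map pvStat)).map Prod.fst) lines 0 with
    | some i => rfl
    | none =>
      simp only [Option.map_none]
      -- mid phase
      have hmid0 : 0 < lines.length / 2 := by omega
      have hmidn : lines.length / 2 < lines.length := Nat.div_lt_self (by omega) (by omega)
      rw [if_pos ⟨hmid0, hmidn⟩]
      have hpre : PySem.Str.len (PySem.Str.strip (PySem.Str.join "" (lines.take (lines.length / 2)))) =
          ((pvPstripList (0, 0) (lines.map pvStat)).getD (lines.length / 2 - 1) 0 : Int) := by
        rw [hps (lines.length / 2 - 1) (by omega), PySem.Str.len_eq, PySem.Str.toList_strip,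
          pv_join_toList, show lines.length / 2 - 1 + 1 = lines.length / 2 by omega]
        rfl
      have hsuf : PySem.Str.len (PySem.Str.strip (PySem.Str.join "" (lines.drop (lines.length / 2)))) =
          (((pvSstripList (lines.map pvStat)).map Prod.fst).getD (lines.length / 2) 0 : Int) := by
        rw [hss (lines.length / 2) (by omega), PySem.Str.len_eq, PySem.Str.toList_strip,
          pv_join_toList]
        rfl
      by_cases hM : 10 ≤ ((pvPstripList (0, 0) (lines.map pvStat)).getD (lines.length / 2 - 1) 0) ∧
          10 ≤ (((pvSstripList (lines.map pvStat)).map Prod.fst).getD (lines.length / 2) 0)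
      · rw [if_pos (by rw [hpre, hsuf]; exact ⟨by exact_mod_cast hM.1, by exact_mod_cast hM.2⟩),
          if_pos hM]
      · rw [if_neg (by rw [hpre, hsuf]; intro ⟨u, v⟩; exact hM ⟨by exact_mod_cast u, by exact_mod_cast v⟩),
          if_neg hM]
        -- last phase
        by_cases h3 : 3 ≤ lines.length
        · rw [if_pos h3]
          have hpre2 : PySem.Str.len (PySem.Str.strip (PySem.Str.join "" (lines.take (lines.length - 1)))) =
              ((pvPstripList (0, 0) (lines.map pvStat)).getD (lines.length - 2) 0 : Int) := by
            rw [hps (lines.length - 2) (by omega), PySem.Str.len_eq, PySem.Str.toList_strip,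
              pv_join_toList, show lines.length - 2 + 1 = lines.length - 1 by omega]
            rfl
          by_cases hL : 10 ≤ ((pvPstripList (0, 0) (lines.map pvStat)).getD (lines.length - 2) 0)
          · rw [if_pos (by rw [hpre2]; exact_mod_cast hL), if_pos ⟨h3, hL⟩]
          · rw [if_neg (by rw [hpre2]; intro u; exact hL (by exact_mod_cast u)),
              if_neg (by intro ⟨_, v⟩; exact hL v)]
        · rw [if_neg h3, if_neg (by intro ⟨u, _⟩; exact h3 u)]

-- ===== VERDICT (by name: the statement is the Claim_ definition above) =====
theorem handle_simple_file_py_spec : Claim_equal_handle_simple_file_py := by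
  intro lines _
  show _ = _
  exact pv_main lines
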